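-- pv_equiv track=rewrite | github.com/nkprasad12/morcus-net | src/py/utils/pipeline.py | find_starts
-- ===== SOURCE A (Python) =====
-- def find_starts(tokens: "list[str]", text: str) -> "list[int]":
--     text_chars = enumerate(iter(text))
--     starts = []
--     for token in tokens:
--         length = len(token)
--         matched = 0
--         candidate = -1
--         while matched < length:
--             i, current = next(text_chars)
--             if current != token[matched]:
--                 matched = 0
--                 continue
--             if matched == 0:
--                 candidate = i
--             matched += 1
--         starts.append(candidate)
--     assert len(starts) == len(tokens)
--     return starts
-- ===== SOURCE B (Python) =====
-- def find_starts(tokens: "list[str]", text: str) -> "list[int]":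
--     it = enumerate(iter(text))
--     starts = []
--     ti = 0
--     rem = tokens[0] if tokens else ""
--     candidate = -1
--     while ti < len(tokens):
--         if not rem:
--             starts.append(candidate)
--             ti += 1
--             rem = tokens[ti] if ti < len(tokens) else ""
--             candidate = -1
--             continue
--         i, c = next(it)
--         if c != rem[0]:
--             rem = tokens[ti]
--             continue
--         if rem == tokens[ti]:
--             candidate = i
--         rem = rem[1:]
--     assert len(starts) == len(tokens)
--     return starts
-- ===== Notes on version B (the rewrite author's own statement) =====
-- stated objective: alternative
-- what changed: Replaces A's nested outer-token-for / inner-while structure with a single flat state-machine loop over one shared character iterator, maintaining the token index and the yet-unmatched suffix of the current token (a string) instead of a matched counter; B returns A's exact value wherever A returns.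
import Mathlib
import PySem

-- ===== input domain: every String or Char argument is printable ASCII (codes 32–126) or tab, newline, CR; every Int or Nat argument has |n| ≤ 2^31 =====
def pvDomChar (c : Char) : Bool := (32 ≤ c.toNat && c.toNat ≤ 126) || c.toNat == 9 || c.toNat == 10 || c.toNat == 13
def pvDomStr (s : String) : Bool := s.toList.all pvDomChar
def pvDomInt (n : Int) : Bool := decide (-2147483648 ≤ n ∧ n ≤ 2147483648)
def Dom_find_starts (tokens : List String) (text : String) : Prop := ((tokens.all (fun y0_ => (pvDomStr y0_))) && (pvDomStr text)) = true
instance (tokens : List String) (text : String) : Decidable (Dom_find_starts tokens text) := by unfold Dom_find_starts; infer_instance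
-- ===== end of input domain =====

-- B replaces A's nested outer-token/inner-while automaton with a single flat state-machine loop that threads the token index and the yet-unmatched suffix of the current token (alternative decomposition; equal return values wherever A returns).


-- ===== PORT A =====
-- the inner `while matched < length` loop; `next(text_chars)` on the exhausted stream = StopIteration = none
-- (token[matched] is in range because of the loop guard, hence getD)
def pvInnerA (tok : List Char) (stream : List (Int × Char)) (matched : Nat) (candidate : Int) :
    Option (Int × List (Int × Char)) :=
  if matched < tok.length then
    match stream with
    | [] => none
    | (i, c) :: rest =>
      if c ≠ tok.getD matched ' ' then pvInnerA tok rest 0 candidate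
      else pvInnerA tok rest (matched + 1) (if matched == 0 then i else candidate)
  else some (candidate, stream)
termination_by stream.length
decreasing_by all_goals simp

-- the outer `for token in tokens` loop, threading the shared enumerate iterator and `starts`
def pvOuterA (tokens : List String) (stream : List (Int × Char)) (starts : List Int) :
    Option (List Int) :=
  match tokens with
  | [] => some starts
  | token :: ts =>
    match pvInnerA token.toList stream 0 (-1) with
    | none => none
    | some (candidate, rest) => pvOuterA ts rest (starts ++ [candidate])

def find_starts (tokens : List String) (text : String) : List Int :=
  (pvOuterA tokens (PySem.List.enumerate text.toList 0) []).getD []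

-- ===== PORT B =====
-- B's single `while ti < len(tokens)` loop; state = (ti, rem, candidate);
-- `next(it)` on the exhausted stream = StopIteration = none; tokens[ti] in range, hence getD
def pvLoopB (tokens : List String) (stream : List (Int × Char)) (ti : Nat)
    (rem : List Char) (candidate : Int) (starts : List Int) : Option (List Int) :=
  if hti : ti < tokens.length then
    match rem with
    | [] =>
      pvLoopB tokens stream (ti + 1) (tokens.getD (ti + 1) "").toList (-1) (starts ++ [candidate])
    | c0 :: rtl =>
      match stream with
      | [] => none
      | (i, c) :: rest =>
        if c ≠ c0 then pvLoopB tokens rest ti (tokens.getD ti "").toList candidate starts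
        else
          pvLoopB tokens rest ti rtl
            (if rem = (tokens.getD ti "").toList then i else candidate) starts
  else some starts
termination_by (stream.length, tokens.length - ti)
decreasing_by
  · exact Prod.Lex.right _ (by omega)
  · exact Prod.Lex.left _ _ (by simp)
  · exact Prod.Lex.left _ _ (by simp)

def find_starts_alt (tokens : List String) (text : String) : List Int :=
  (pvLoopB tokens (PySem.List.enumerate text.toList 0) 0 (tokens.getD 0 "").toList (-1) []).getD []

-- ===== PRECONDITION & SPEC =====
-- Pre_ excludes exactly the inputs on which Python A raises StopIteration (the text stream is
-- exhausted before the restart scan has matched every token); on every other input A returns.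
-- pvNeeds returns the text left after the scan matches one token (none = text ran out).
def pvNeeds (tok : List Char) (m : Nat) (s : List Char) : Option (List Char) :=
  if m < tok.length then
    match s with
    | [] => none
    | c :: rest => if c = tok.getD m ' ' then pvNeeds tok (m + 1) rest else pvNeeds tok 0 rest
  else some s
termination_by structural s

def pvAllOk (tokens : List String) (s : List Char) : Bool :=
  match tokens with
  | [] => true
  | t :: ts =>
    match pvNeeds t.toList 0 s with
    | none => false
    | some r => pvAllOk ts r

def Pre_find_starts (tokens : List String) (text : String) : Prop :=
  pvAllOk tokens text.toList = true

instance (tokens : List String) (text : String) : Decidable (Pre_find_starts tokens text) := by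
  unfold Pre_find_starts; infer_instance

def pvWitness_find_starts : List String × String := (["ab", "", "a"], "xaba")

def Spec_find_starts (tokens : List String) (text : String) (out : List Int) : Prop := out = find_starts_alt tokens text
instance (tokens : List String) (text : String) (out : List Int) : Decidable (Spec_find_starts tokens text out) := by unfold Spec_find_starts; infer_instance

-- ===== CLAIM (what is proved, stated in full; the proofs are below) =====
def Claim_equal_find_starts : Prop := ∀ (tokens : List String) (text : String), Dom_find_starts tokens text → Pre_find_starts tokens text → Spec_find_starts tokens text (find_starts tokens text)

-- ===== LEMMAS AND PROOFS =====

-- B's loop, while matching token ti from state `rem = tok.drop m`, simulates A's inner scanner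
-- and, on success, continues with the next token on the leftover stream.
theorem pvInner_corr (tokens : List String) (ti : Nat) (hti : ti < tokens.length)
    (tok : List Char) (htok : (tokens.getD ti "").toList = tok) :
    ∀ (stream : List (Int × Char)) (m : Nat) (cand : Int) (starts : List Int),
    m ≤ tok.length →
    pvLoopB tokens stream ti (tok.drop m) cand starts
      = match pvInnerA tok stream m cand with
        | none => none
        | some (c, rest) =>
            pvLoopB tokens rest (ti + 1) ((tokens.getD (ti + 1) "").toList) (-1) (starts ++ [c]) := by
  intro stream
  induction stream with
  | nil =>
    intro m cand starts hm
    by_cases hlt : m < tok.length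
    · rw [List.drop_eq_getElem_cons hlt, pvLoopB, dif_pos hti, pvInnerA, if_pos hlt]
    · have hm' : m = tok.length := by omega
      rw [hm', List.drop_length, pvLoopB, dif_pos hti, pvInnerA.eq_def, if_neg (by omega)]
  | cons p rest ih =>
    intro m cand starts hm
    obtain ⟨i, c⟩ := p
    by_cases hlt : m < tok.length
    · have hget : tok.getD m ' ' = tok[m] := List.getD_eq_getElem tok ' ' hlt
      rw [List.drop_eq_getElem_cons hlt, pvLoopB, dif_pos hti, pvInnerA, if_pos hlt, hget, htok]
      by_cases hc : c = tok[m]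
      · have hne : ¬ (c ≠ tok[m]) := by simp [hc]
        rw [if_neg hne, if_neg hne]
        have hcand : (tok[m] :: tok.drop (m + 1) = tok) ↔ (m = 0) := by
          constructor
          · intro h
            have := congrArg List.length h
            simp [List.length_drop] at this
            omega
          · intro h
            subst h
            rw [← List.drop_eq_getElem_cons hlt, List.drop_zero]
        have hifeq : (if tok[m] :: tok.drop (m + 1) = tok then i else cand)
            = (if (m == 0) = true then i else cand) := by
          by_cases h0 : m = 0
          · rw [if_pos (hcand.mpr h0), if_pos (by simp [h0])]
          · rw [if_neg (fun h => h0 (hcand.mp h)), if_neg (by simp [h0])]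
        rw [hifeq]
        exact ih (m + 1) (if (m == 0) = true then i else cand) starts (by omega)
      · have hne : (c ≠ tok[m]) := hc
        rw [if_pos hne, if_pos hne]
        have := ih 0 cand starts (by omega)
        rw [List.drop_zero] at this
        exact this
    · have hm' : m = tok.length := by omega
      rw [hm', List.drop_length, pvLoopB, dif_pos hti, pvInnerA.eq_def, if_neg (by omega)]

-- the outer correspondence: A's token loop from `tokens.drop ti` = B's loop from index ti
theorem pvOuter_corr :
    ∀ (n : Nat) (tokens : List String) (ti : Nat) (stream : List (Int × Char)) (starts : List Int),
    tokens.length ≤ ti + n →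
    pvOuterA (tokens.drop ti) stream starts
      = pvLoopB tokens stream ti ((tokens.getD ti "").toList) (-1) starts := by
  intro n
  induction n with
  | zero =>
    intro tokens ti stream starts hle
    rw [List.drop_eq_nil_of_le (by omega), pvOuterA, pvLoopB.eq_def, dif_neg (by omega)]
  | succ n ih =>
    intro tokens ti stream starts hle
    by_cases hti : ti < tokens.length
    · rw [List.drop_eq_getElem_cons hti, pvOuterA]
      have hgd : tokens.getD ti "" = tokens[ti] := List.getD_eq_getElem tokens "" hti
      have hcorr := pvInner_corr tokens ti hti tokens[ti].toList (by rw [hgd])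
        stream 0 (-1) starts (Nat.zero_le _)
      rw [List.drop_zero] at hcorr
      rw [hgd, hcorr]
      cases pvInnerA tokens[ti].toList stream 0 (-1) with
      | none => rfl
      | some p =>
        obtain ⟨cand, rest⟩ := p
        exact ih tokens (ti + 1) rest (starts ++ [cand]) (by omega)
    · rw [List.drop_eq_nil_of_le (by omega), pvOuterA, pvLoopB.eq_def, dif_neg (by omega)]

-- ===== VERDICT (by name: the statement is the Claim_ definition above) =====
theorem find_starts_spec : Claim_equal_find_starts := by
  intro tokens text _ _
  unfold Spec_find_starts find_starts find_starts_alt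
  have h := pvOuter_corr tokens.length tokens 0 (PySem.List.enumerate text.toList 0) []
    (by omega)
  rw [List.drop_zero] at h
  rw [h]
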